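-- pv_equiv track=rewrite | github.com/Dapman/InDE_5_1b | app/modules/iml/momentum_pattern_engine.py | _pair_snapshots_by_pursuit
-- ===== SOURCE A (Python) =====
-- from typing import Optional, List, Dict, Any
--
-- def _pair_snapshots_by_pursuit(snapshots: List[Dict[str, Any]]) -> List[dict]:
--     """
--     Pair consecutive snapshots within the same pursuit to compute
--     before/after momentum deltas. Returns list of pair dicts.
--     """
--     by_pursuit: Dict[str, List[Dict[str, Any]]] = {}
--     for s in snapshots:
--         pid = s.get("pursuit_id", "")
--         by_pursuit.setdefault(pid, []).append(s)
--     pairs = []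
--     for pid, snaps in by_pursuit.items():
--         snaps.sort(key=lambda x: x.get("recorded_at", ""))
--         for i in range(1, len(snaps)):
--             pairs.append({"before": snaps[i - 1], "after": snaps[i]})
--     return pairs
-- ===== SOURCE B (Python) =====
-- def _pair_snapshots_by_pursuit(snapshots):
--     """
--     Same pairing via one global stable sort: rank each pursuit_id by first
--     appearance, sort all snapshots once by (rank, recorded_at), then pair
--     adjacent snapshots that share a pursuit_id in a single flat scan.
--     """
--     rank = {}
--     for s in snapshots:
--         pid = s.get("pursuit_id", "")
--         if pid not in rank:
--             rank[pid] = len(rank)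
--     ordered = sorted(snapshots, key=lambda s: (rank[s.get("pursuit_id", "")], s.get("recorded_at", "")))
--     pairs = []
--     for prev, cur in zip(ordered, ordered[1:]):
--         if prev.get("pursuit_id", "") == cur.get("pursuit_id", ""):
--             pairs.append({"before": prev, "after": cur})
--     return pairs
-- ===== Notes on version B (the rewrite author's own statement) =====
-- stated objective: alternative
-- what changed: Replaces A's dict-of-lists grouping with per-group sorts and an inner index loop by a first-appearance rank pass, one global stable sort keyed on (rank, recorded_at), and a single flat scan that pairs adjacent snapshots sharing a pursuit_id.
import Mathlib
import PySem

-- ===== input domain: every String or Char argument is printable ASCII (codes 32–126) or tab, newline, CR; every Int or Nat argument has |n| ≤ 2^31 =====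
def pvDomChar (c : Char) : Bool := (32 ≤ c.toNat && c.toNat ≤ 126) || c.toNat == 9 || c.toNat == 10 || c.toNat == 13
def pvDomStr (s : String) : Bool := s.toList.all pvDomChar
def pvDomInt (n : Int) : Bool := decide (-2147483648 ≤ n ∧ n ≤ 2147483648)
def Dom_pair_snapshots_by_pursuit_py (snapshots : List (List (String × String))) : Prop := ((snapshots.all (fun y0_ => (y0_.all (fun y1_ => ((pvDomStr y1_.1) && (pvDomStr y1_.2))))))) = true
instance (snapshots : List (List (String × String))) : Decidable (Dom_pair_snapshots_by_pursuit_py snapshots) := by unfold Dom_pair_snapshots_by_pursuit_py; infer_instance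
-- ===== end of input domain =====

-- B replaces A's dict-of-lists grouping + per-group sort + index loop by one first-appearance
-- rank pass, a single global stable sort on (rank, recorded_at) and one flat adjacent scan
-- (objective: alternative decomposition, same result; return values proved equal — A only sorts
-- lists held inside its own local dict in place, no argument is mutated).

-- s.get(k, d) on a snapshot (a Python dict, here an association list)
def pvSget (s : List (String × String)) (k d : String) : String :=
  (PySem.Dict.mk s).getD k d

-- ===== PORT A =====
def pair_snapshots_by_pursuit_py (snapshots : List (List (String × String))) : List (List (String × List (String × String))) :=
  -- by_pursuit.setdefault(pid, []).append(s)  ==  d[pid] = d.get(pid, []) + [s]  (position kept)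
  let by_pursuit : PySem.Dict String (List (List (String × String))) :=
    snapshots.foldl (fun d s => d.modify (pvSget s "pursuit_id" "") [] (fun g => g ++ [s])) PySem.Dict.empty
  by_pursuit.items.foldl (fun pairs pg =>
    let snaps := PySem.List.sorted pg.2 (fun x => pvSget x "recorded_at" "")
    (PySem.List.pyRange 1 (PySem.List.len snaps) 1).foldl (fun acc i =>
        match PySem.List.pyGet? snaps (i - 1), PySem.List.pyGet? snaps i with
        | some a, some b => acc ++ [[("before", a), ("after", b)]]
        | _, _ => acc) pairs) []   -- indices i, i-1 are always in range; the fallback arm is a totality guard only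

-- ===== PORT B =====
def pair_snapshots_by_pursuit_py_alt (snapshots : List (List (String × String))) : List (List (String × List (String × String))) :=
  let rank : PySem.Dict String Int :=
    snapshots.foldl (fun d s =>
      let p := pvSget s "pursuit_id" ""
      if d.contains p then d else d.insert p ((PySem.Dict.size d : Nat) : Int)) PySem.Dict.empty
  -- rank[pid] never misses (every pid was ranked in the pass above); getD's 0 is a totality default only
  let ordered := PySem.List.sorted2 snapshots
      (fun s => rank.getD (pvSget s "pursuit_id" "") 0) (fun s => pvSget s "recorded_at" "")
  (ordered.zip (PySem.List.slice ordered (some 1))).foldl (fun pairs pc =>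
     if pvSget pc.1 "pursuit_id" "" == pvSget pc.2 "pursuit_id" ""
     then pairs ++ [[("before", pc.1), ("after", pc.2)]] else pairs) []

-- ===== PRECONDITION & SPEC =====
def Spec_pair_snapshots_by_pursuit_py (snapshots : List (List (String × String))) (out : List (List (String × List (String × String)))) : Prop := out = pair_snapshots_by_pursuit_py_alt snapshots
instance (snapshots : List (List (String × String))) (out : List (List (String × List (String × String)))) : Decidable (Spec_pair_snapshots_by_pursuit_py snapshots out) := by unfold Spec_pair_snapshots_by_pursuit_py; infer_instance

-- ===== CLAIM (what is proved, stated in full; the proofs are below) =====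
def Claim_equal_pair_snapshots_by_pursuit_py : Prop := ∀ (snapshots : List (List (String × String))), Dom_pair_snapshots_by_pursuit_py snapshots → Spec_pair_snapshots_by_pursuit_py snapshots (pair_snapshots_by_pursuit_py snapshots)

-- ===== LEMMAS AND PROOFS =====
-- Both ports are proved equal to a common canonical form pvCanon: for each distinct pursuit_id in
-- order of first appearance, the consecutive pairs of that pursuit's snapshots sorted stably by
-- recorded_at.

def pvPid (s : List (String × String)) : String := pvSget s "pursuit_id" ""
def pvRec (s : List (String × String)) : String := pvSget s "recorded_at" ""
def pvKeys (xs : List (List (String × String))) : List String := PySem.Set.ofList (xs.map pvPid)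
def pvGroup (xs : List (List (String × String))) (p : String) : List (List (String × String)) :=
  xs.filter (fun s => pvPid s == p)
def pvPairsOf (ys : List (List (String × String))) : List (List (String × List (String × String))) :=
  (ys.zip ys.tail).map (fun pc => [("before", pc.1), ("after", pc.2)])

def pvCanon (xs : List (List (String × String))) : List (List (String × List (String × String))) :=
  (pvKeys xs).flatMap (fun p => pvPairsOf (PySem.List.sorted (pvGroup xs p) pvRec))

theorem pv_insertBy_cons {α : Type} (bef : α → α → Bool) (x y : α) (ys : List α) :
    PySem.List.insertBy bef x (y :: ys) =
      if bef x y then x :: y :: ys else y :: PySem.List.insertBy bef x ys := rfl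
theorem pv_insertBy_skip {α : Type} (bef : α → α → Bool) (x : α) :
    ∀ (A r : List α), (∀ y ∈ A, bef x y = false) →
      PySem.List.insertBy bef x (A ++ r) = A ++ PySem.List.insertBy bef x r := by
  intro A
  induction A with
  | nil => simp
  | cons a t ih =>
      intro r h
      simp only [List.cons_append, pv_insertBy_cons, h a (by simp)]
      simp [ih r (fun y hy => h y (by simp [hy]))]
theorem pv_insertBy_stop {α : Type} (bef : α → α → Bool) (x : α) :
    ∀ (B C : List α), (∀ y ∈ C, bef x y = true) →
      PySem.List.insertBy bef x (B ++ C) = PySem.List.insertBy bef x B ++ C := by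
  intro B
  induction B with
  | nil =>
      intro C h
      cases C with
      | nil => simp
      | cons c t => simp [PySem.List.insertBy, pv_insertBy_cons, h c (by simp)]
  | cons b t ih =>
      intro C h
      simp only [List.cons_append, pv_insertBy_cons]
      by_cases hb : bef x b
      · simp [hb]
      · simp [hb, ih C h]
theorem pv_insertBy_congr {α : Type} (bef bef2 : α → α → Bool) (x : α) :
    ∀ (B : List α), (∀ y ∈ B, bef x y = bef2 x y) →
      PySem.List.insertBy bef x B = PySem.List.insertBy bef2 x B := by
  intro B
  induction B with
  | nil => intro _; rfl
  | cons b t ih =>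
      intro h
      simp only [pv_insertBy_cons, h b (by simp)]
      by_cases hb : bef2 x b
      · simp [hb]
      · simp [hb, ih (fun y hy => h y (by simp [hy]))]

theorem pv_sort2_decomp {α : Type} (k1 : α → Int) (k2 : α → String) :
    ∀ (xs : List α) (vs : List Int), vs.Pairwise (· < ·) → (∀ x ∈ xs, k1 x ∈ vs) →
      PySem.List.sorted2 xs k1 k2 =
        vs.flatMap (fun v => PySem.List.sorted (xs.filter (fun x => k1 x == v)) k2) := by
  intro xs
  induction xs using List.reverseRecOn with
  | nil => intro vs _ _; simp [PySem.List.sorted2, PySem.List.sorted]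
  | append_singleton xs x ih =>
      intro vs hp hmem
      have hx : k1 x ∈ vs := hmem x (by simp)
      obtain ⟨vs1, vs2, hvs⟩ := List.append_of_mem hx
      have hxs : ∀ y ∈ xs, k1 y ∈ vs := fun y hy => hmem y (by simp [hy])
      -- pairwise facts
      subst hvs
      have hp1 : ∀ v ∈ vs1, v < k1 x := by
        intro v hv
        have := (List.pairwise_append.mp hp).2.2 v hv (k1 x) (by simp)
        exact this
      have hp2 : ∀ v ∈ vs2, k1 x < v := by
        have := ((List.pairwise_append.mp hp).2.1)
        exact fun v hv => (List.pairwise_cons.mp this).1 v hv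
      -- LHS: one insertion into the IH decomposition
      have hstep : PySem.List.sorted2 (xs ++ [x]) k1 k2 =
          PySem.List.insertBy (fun a b => decide (k1 a < k1 b) || (!decide (k1 b < k1 a) && decide (k2 a < k2 b))) x
            (PySem.List.sorted2 xs k1 k2) := by
        simp [PySem.List.sorted2, List.foldl_append]
      set bef := fun a b => decide (k1 a < k1 b) || (!decide (k1 b < k1 a) && decide (k2 a < k2 b)) with hbef
      set g := fun v => PySem.List.sorted (xs.filter (fun y => k1 y == v)) k2 with hg
      have hmemg : ∀ v, ∀ y ∈ g v, k1 y = v := by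
        intro v y hy
        rw [hg] at hy
        have := (PySem.List.mem_sorted _ _ _ _).mp hy
        simpa using (List.mem_filter.mp this).2
      rw [hstep, ih (vs1 ++ k1 x :: vs2) hp hxs]
      rw [List.flatMap_append, List.flatMap_cons]
      rw [pv_insertBy_skip bef x (vs1.flatMap g) _ ?hskip]
      case hskip =>
        intro y hy
        obtain ⟨v, hv, hyv⟩ := List.mem_flatMap.mp hy
        have := hmemg v y hyv
        have hlt : k1 y < k1 x := this ▸ hp1 v hv
        simp [hbef]
        constructor
        · omega
        · intro h; omega
      rw [pv_insertBy_stop bef x (g (k1 x)) (vs2.flatMap g) ?hstop]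
      case hstop =>
        intro y hy
        obtain ⟨v, hv, hyv⟩ := List.mem_flatMap.mp hy
        have := hmemg v y hyv
        have hlt : k1 x < k1 y := this ▸ hp2 v hv
        simp [hbef]
        omega
      rw [pv_insertBy_congr bef (fun a b => decide (k2 a < k2 b)) x (g (k1 x)) ?hcg]
      case hcg =>
        intro y hy
        have := hmemg (k1 x) y hy
        simp [hbef, this]
      -- now match RHS groupwise
      have hfe : ∀ v, (xs ++ [x]).filter (fun y => k1 y == v) =
          xs.filter (fun y => k1 y == v) ++ if k1 x == v then [x] else [] := by
        intro v; rw [List.filter_append]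
        by_cases h : (k1 x == v) <;> simp [List.filter, h]
      rw [List.flatMap_append, List.flatMap_cons]
      congr 1
      · apply List.flatMap_congr
        intro v hv
        have hne : ¬ (k1 x == v) := by
          have := hp1 v hv; simp; omega
        rw [hfe v]; simp [hne, hg]
      · congr 1
        · -- middle group: sorted (filter ++ [x]) k2 = insertBy into sorted filter
          rw [hfe (k1 x)]
          simp only [beq_self_eq_true, if_pos]
          rw [PySem.List.sorted_eq_foldl_insertBy, List.foldl_append]
          simp only [hg, PySem.List.sorted_eq_foldl_insertBy]
          rfl
        · apply List.flatMap_congr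
          intro v hv
          have hne : ¬ (k1 x == v) := by
            have := hp2 v hv; simp; omega
          rw [hfe v]; simp [hne, hg]

theorem pv_keys_append (xs : List (List (String × String))) (x : List (String × String)) :
    pvKeys (xs ++ [x]) = if pvPid x ∈ pvKeys xs then pvKeys xs else pvKeys xs ++ [pvPid x] := by
  unfold pvKeys
  rw [List.map_append, PySem.Set.ofList_eq_foldl, List.foldl_append, ← PySem.Set.ofList_eq_foldl]
  simp [PySem.Set.add, PySem.Set.contains]

theorem pv_group_append (xs : List (List (String × String))) (x : List (String × String)) (p : String) :
    pvGroup (xs ++ [x]) p = pvGroup xs p ++ if pvPid x == p then [x] else [] := by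
  unfold pvGroup
  rw [List.filter_append]
  by_cases h : (pvPid x == p) <;> simp [List.filter, h]

theorem pv_group_nil_of_not_mem (xs : List (List (String × String))) (p : String)
    (h : p ∉ pvKeys xs) : pvGroup xs p = [] := by
  rw [pvGroup, List.filter_eq_nil_iff]
  intro s hs hb
  exact h (by
    rw [pvKeys, PySem.Set.mem_ofList]
    exact (eq_of_beq hb) ▸ List.mem_map_of_mem hs)

theorem pv_nodup_keys (xs : List (List (String × String))) : (pvKeys xs).Nodup :=
  PySem.Set.nodup_ofList _

theorem pvPid_def (s : List (String × String)) : pvSget s "pursuit_id" "" = pvPid s := rfl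

theorem pv_groups (xs : List (List (String × String))) :
    xs.foldl (fun d s => d.modify (pvSget s "pursuit_id" "") [] (fun g => g ++ [s])) PySem.Dict.empty
      = PySem.Dict.mk ((pvKeys xs).map (fun p => (p, pvGroup xs p))) := by
  induction xs using List.reverseRecOn with
  | nil => rfl
  | append_singleton xs x ih =>
      rw [List.foldl_append, ih]
      simp only [List.foldl_cons, List.foldl_nil, pvPid_def]
      have hkeys : (PySem.Dict.mk ((pvKeys xs).map (fun p => (p, pvGroup xs p)))).keys = pvKeys xs := by
        rw [PySem.Dict.keys_mk, List.map_map]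
        simp only [Function.comp_def]
        exact List.map_id' _
      have hcont : (PySem.Dict.mk ((pvKeys xs).map (fun p => (p, pvGroup xs p)))).contains (pvPid x)
          = decide (pvPid x ∈ pvKeys xs) := by
        rw [PySem.Dict.contains_eq_decide_mem_keys, hkeys]
      by_cases hm : pvPid x ∈ pvKeys xs
      · have hget : (PySem.Dict.mk ((pvKeys xs).map (fun p => (p, pvGroup xs p)))).getD (pvPid x) []
            = pvGroup xs (pvPid x) := by
          apply PySem.Dict.getD_of_mem_items
          · exact List.mem_map_of_mem hm
          · rw [hkeys]; exact pv_nodup_keys xs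
        rw [PySem.Dict.modify, hget, PySem.Dict.insert, hcont]
        simp only [hm, decide_true, if_pos]
        rw [pv_keys_append]
        simp only [hm, if_pos]
        congr 1
        rw [List.map_map]
        apply List.map_congr_left
        intro p hp
        simp only [Function.comp_apply]
        by_cases hpp : p = pvPid x
        · subst hpp
          rw [pv_group_append]
          simp
        · have hb : (p == pvPid x) = false := by simpa using hpp
          have hb2 : (pvPid x == p) = false := by
            simp only [beq_eq_false_iff_ne, ne_eq]
            exact fun h => hpp h.symm
          rw [pv_group_append]
          simp [hb, hb2]
      · have hget : (PySem.Dict.mk ((pvKeys xs).map (fun p => (p, pvGroup xs p)))).getD (pvPid x) []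
            = [] := by
          apply PySem.Dict.getD_of_not_contains
          rw [hcont]; simp [hm]
        rw [PySem.Dict.modify, hget, PySem.Dict.insert, hcont]
        simp only [hm, decide_false, Bool.false_eq_true, if_neg, not_false_iff]
        rw [pv_keys_append]
        simp only [hm, if_neg, not_false_iff]
        congr 1
        rw [List.map_append]
        congr 1
        · apply List.map_congr_left
          intro p hp
          rw [pv_group_append]
          have hne : (pvPid x == p) = false := by
            simp only [beq_eq_false_iff_ne, ne_eq]
            intro h; exact hm (h ▸ hp)
          simp [hne]
        · simp only [List.map_cons, List.map_nil]
          rw [pv_group_append, pv_group_nil_of_not_mem xs _ hm]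
          simp

theorem pv_rangeAdj (ys : List (List (String × String))) :
    (PySem.List.pyRange 1 (ys.length : Int) 1).map
        (fun i => [("before", ys[(i-1).toNat]!), ("after", ys[i.toNat]!)]) = pvPairsOf ys := by
  rw [PySem.List.pyRange_of_pos 1 (ys.length : Int) (by omega)]
  rw [List.map_map]
  by_cases hlen : ys.length ≤ 1
  · have h1 : ¬ ((1:Int) < (ys.length : Int)) := by omega
    simp only [h1, if_neg, not_false_iff, List.range_zero, List.map_nil]
    unfold pvPairsOf
    match ys, hlen with
    | [], _ => rfl
    | [y], _ => rfl
  · have h1 : ((1:Int) < (ys.length : Int)) := by omega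
    rw [if_pos h1]
    have hsz : ((ys.length : Int) - 1 + 1 - 1) / 1 = (ys.length : Int) - 1 := by omega
    rw [hsz]
    apply List.ext_getElem
    · simp [pvPairsOf]
    · intro k h₁ h₂
      simp only [List.getElem_map, List.getElem_range]
      have hk : k + 1 < ys.length := by
        simp at h₁; omega
      have e1 : ((1 : Int) + 1 * (k:Int) - 1).toNat = k := by omega
      have e2 : ((1 : Int) + 1 * (k:Int)).toNat = k + 1 := by omega
      simp only [Function.comp_apply]
      rw [e1, e2]
      unfold pvPairsOf
      simp only [List.getElem_map, List.getElem_zip, List.getElem_tail]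
      rw [getElem!_pos ys k (by omega), getElem!_pos ys (k+1) hk]

theorem pv_inner (ys : List (List (String × String))) (acc : List (List (String × List (String × String)))) :
    (PySem.List.pyRange 1 (PySem.List.len ys) 1).foldl (fun acc i =>
        match PySem.List.pyGet? ys (i - 1), PySem.List.pyGet? ys i with
        | some a, some b => acc ++ [[("before", a), ("after", b)]]
        | _, _ => acc) acc = acc ++ pvPairsOf ys := by
  rw [PySem.List.foldl_congr_mem _ _
      (fun acc i => acc ++ [[("before", ys[(i-1).toNat]!), ("after", ys[i.toNat]!)]]) acc ?hc]
  case hc =>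
    intro a i hi
    have hmem := PySem.List.mem_pyRange_one.mp (by simpa [PySem.List.len] using hi)
    have h0 : (0:Int) ≤ i - 1 := by omega
    have h1 : i - 1 < (ys.length : Int) := by
      have := hmem.2; simp at this ⊢; omega
    have h2 : (0:Int) ≤ i := by omega
    have h3 : i < (ys.length : Int) := by
      have := hmem.2; simp at this ⊢; omega
    rw [PySem.List.pyGet?_eq_some_getElem ys h0 h1, PySem.List.pyGet?_eq_some_getElem ys h2 h3]
    simp only [getElem!_pos ys (i-1).toNat (by omega), getElem!_pos ys i.toNat (by omega)]
  rw [PySem.List.foldl_append_singleton_eq_map]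
  congr 1
  have : PySem.List.len ys = (ys.length : Int) := by simp [PySem.List.len_eq]
  rw [this, pv_rangeAdj]

theorem A_eq_canon (xs : List (List (String × String))) :
    pair_snapshots_by_pursuit_py xs = pvCanon xs := by
  unfold pair_snapshots_by_pursuit_py
  rw [pv_groups]
  simp only [pv_inner]
  rw [PySem.List.foldl_append_eq_flatMap]
  rw [List.flatMap_map]
  rfl

def pvRank (xs : List (List (String × String))) : PySem.Dict String Int :=
  xs.foldl (fun d s =>
      let p := pvSget s "pursuit_id" ""
      if d.contains p then d else d.insert p ((PySem.Dict.size d : Nat) : Int)) PySem.Dict.empty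

theorem pv_rank_items (xs : List (List (String × String))) :
    (pvRank xs).items = (PySem.List.enumerate (pvKeys xs) 0).map (fun q => (q.2, q.1)) := by
  unfold pvRank
  induction xs using List.reverseRecOn with
  | nil => rfl
  | append_singleton xs x ih =>
      rw [List.foldl_append]
      simp only [List.foldl_cons, List.foldl_nil]
      set d := xs.foldl (fun d s =>
        let p := pvSget s "pursuit_id" ""
        if d.contains p then d else d.insert p ((PySem.Dict.size d : Nat) : Int)) PySem.Dict.empty with hd
      have hkeys : d.keys = pvKeys xs := by
        show d.items.map (fun q => q.1) = pvKeys xs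
        rw [ih, List.map_map]
        simp only [Function.comp_def]
        exact PySem.List.map_snd_enumerate _ _
      have hcont : d.contains (pvSget x "pursuit_id" "") = decide (pvPid x ∈ pvKeys xs) := by
        rw [PySem.Dict.contains_eq_decide_mem_keys, hkeys]; rfl
      by_cases hm : pvPid x ∈ pvKeys xs
      · rw [if_pos (by rw [hcont]; simp [hm])]
        rw [ih, pv_keys_append]
        simp [hm]
      · rw [if_neg (by rw [hcont]; simp [hm])]
        rw [PySem.Dict.items_insert_of_not_contains d _ (by rw [hcont]; simp [hm])]
        rw [ih, pv_keys_append]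
        simp only [hm, if_neg, not_false_iff]
        rw [PySem.List.enumerate_append, List.map_append]
        congr 1
        have hsz : PySem.Dict.size d = (pvKeys xs).length := by
          show d.items.length = _
          rw [ih]
          simp [PySem.List.length_enumerate]
        simp [PySem.List.enumerate, hsz, pvPid_def]

theorem pv_rank_getD (xs : List (List (String × String))) (j : Nat) (hj : j < (pvKeys xs).length) :
    (pvRank xs).getD ((pvKeys xs)[j]) 0 = (j : Int) := by
  apply PySem.Dict.getD_of_mem_items
  · rw [pv_rank_items]
    have : ((0:Int) + (j:Int), (pvKeys xs)[j]) ∈ PySem.List.enumerate (pvKeys xs) 0 := by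
      rw [PySem.List.mem_enumerate_iff]
      exact ⟨j, hj, rfl⟩
    have := List.mem_map_of_mem (f := fun q => (q.2, q.1)) this
    simpa using this
  · show ((pvRank xs).items.map (fun q => q.1)).Nodup
    rw [pv_rank_items, List.map_map]
    simp only [Function.comp_def]
    rw [PySem.List.map_snd_enumerate]
    exact pv_nodup_keys xs

theorem pv_adj_append {α : Type} :
    ∀ (A B : List α) (hA : A ≠ []) (hB : B ≠ []),
      (A ++ B).zip (A ++ B).tail
        = A.zip A.tail ++ (A.getLast hA, B.head hB) :: B.zip B.tail := by
  intro A
  induction A with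
  | nil => intro B hA hB; exact absurd rfl hA
  | cons a t ih =>
      intro B hA hB
      cases t with
      | nil =>
          cases B with
          | nil => exact absurd rfl hB
          | cons b bt => simp
      | cons a2 t2 =>
          have ihh := ih B (by simp) hB
          simp only [List.cons_append, List.zip_cons_cons, List.tail_cons] at ihh ⊢
          rw [ihh]
          simp [List.getLast_cons]

theorem pv_scan_concat (G : String → List (List (String × String))) :
    ∀ (ps : List String), ps.Nodup →
      (∀ p ∈ ps, G p ≠ []) → (∀ p ∈ ps, ∀ y ∈ G p, pvPid y = p) →
      ((ps.flatMap G).zip (ps.flatMap G).tail).filter (fun pc => pvPid pc.1 == pvPid pc.2)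
        = ps.flatMap (fun p => (G p).zip (G p).tail) := by
  intro ps
  induction ps with
  | nil => intro _ _ _; rfl
  | cons p rest ih =>
      intro hnd hne hpid
      rw [List.flatMap_cons, List.flatMap_cons]
      by_cases hB : rest.flatMap G = []
      · have hrest : rest = [] := List.eq_nil_iff_forall_not_mem.mpr
          (fun q hq => (hne q (by simp [hq])) ((List.flatMap_eq_nil_iff.mp hB) q hq))
        subst hrest
        simp only [List.flatMap_nil, List.append_nil]
        apply List.filter_eq_self.mpr
        intro pc hpc
        have h1 := (List.of_mem_zip hpc).1
        have h2 := List.mem_of_mem_tail (List.of_mem_zip hpc).2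
        rw [hpid p (by simp) _ h1, hpid p (by simp) _ h2]
        simp
      · rw [pv_adj_append (G p) (rest.flatMap G) (hne p (by simp)) hB]
        rw [List.filter_append, List.filter_cons]
        have hb1 : pvPid ((G p).getLast (hne p (by simp))) = p :=
          hpid p (by simp) _ (List.getLast_mem _)
        have hhead : pvPid ((rest.flatMap G).head hB) ∈ rest := by
          obtain ⟨q, hq, hy⟩ := List.mem_flatMap.mp (List.head_mem hB)
          rw [hpid q (by simp [hq]) _ hy]; exact hq
        have hbf : (pvPid ((G p).getLast (hne p (by simp))) == pvPid ((rest.flatMap G).head hB)) = false := by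
          rw [hb1]
          simp only [beq_eq_false_iff_ne, ne_eq]
          intro h
          exact (List.nodup_cons.mp hnd).1 (h ▸ hhead)
        have hself : ((G p).zip (G p).tail).filter (fun pc => pvPid pc.1 == pvPid pc.2) = (G p).zip (G p).tail := by
          apply List.filter_eq_self.mpr
          intro pc hpc
          have h1 := (List.of_mem_zip hpc).1
          have h2 := List.mem_of_mem_tail (List.of_mem_zip hpc).2
          rw [hpid p (by simp) _ h1, hpid p (by simp) _ h2]
          simp
        rw [hself, ih (List.nodup_cons.mp hnd).2 (fun q hq => hne q (by simp [hq])) (fun q hq => hpid q (by simp [hq]))]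
        simp only [hbf, Bool.false_eq_true, if_neg, not_false_iff]

theorem pv_mem_keys (xs : List (List (String × String))) (s : List (String × String)) (hs : s ∈ xs) :
    pvPid s ∈ pvKeys xs := by
  rw [pvKeys, PySem.Set.mem_ofList]
  exact List.mem_map_of_mem hs

theorem pv_kb_eq (xs : List (List (String × String))) (s : List (String × String)) (hs : s ∈ xs) :
    (pvRank xs).getD (pvPid s) 0 = ((pvKeys xs).idxOf (pvPid s) : Int) := by
  have hm := pv_mem_keys xs s hs
  have hj : (pvKeys xs).idxOf (pvPid s) < (pvKeys xs).length := List.idxOf_lt_length_of_mem hm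
  have := pv_rank_getD xs ((pvKeys xs).idxOf (pvPid s)) hj
  rwa [List.getElem_idxOf hj] at this

theorem pv_range_getD_flatMap {β : Type} (K : List String) (H : String → List β) :
    (List.range K.length).flatMap (fun j => H (K.getD j "")) = K.flatMap H := by
  have hmap : (List.range K.length).map (fun j => K.getD j "") = K := by
    apply List.ext_getElem
    · simp
    · intro i h1 h2
      simp only [List.getElem_map, List.getElem_range]
      exact List.getD_eq_getElem K "" h2
  conv_rhs => rw [← hmap]
  rw [List.flatMap_map]

def pvOrdered (xs : List (List (String × String))) : List (List (String × String)) :=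
  PySem.List.sorted2 xs (fun s => (pvRank xs).getD (pvSget s "pursuit_id" "") 0)
    (fun s => pvSget s "recorded_at" "")

theorem B_eq_canon (xs : List (List (String × String))) :
    pair_snapshots_by_pursuit_py_alt xs = pvCanon xs := by
  have hstep : pair_snapshots_by_pursuit_py_alt xs =
      List.foldl (fun pairs pc =>
        if pvSget pc.1 "pursuit_id" "" == pvSget pc.2 "pursuit_id" ""
        then pairs ++ [[("before", pc.1), ("after", pc.2)]] else pairs) []
        ((pvOrdered xs).zip (PySem.List.slice (pvOrdered xs) (some 1))) := rfl
  rw [hstep]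
  have hord : pvOrdered xs
      = (pvKeys xs).flatMap (fun p => PySem.List.sorted (pvGroup xs p) pvRec) := by
    have hcov : ∀ s ∈ xs, (pvRank xs).getD (pvPid s) 0 ∈ (List.range (pvKeys xs).length).map Int.ofNat := by
      intro s hs
      rw [pv_kb_eq xs s hs]
      exact List.mem_map_of_mem (f := Int.ofNat) (List.mem_range.mpr (List.idxOf_lt_length_of_mem (pv_mem_keys xs s hs)))
    have hpw : ((List.range (pvKeys xs).length).map Int.ofNat).Pairwise (· < ·) :=
      List.pairwise_map.mpr (List.pairwise_lt_range.imp (fun h => Int.ofNat_lt.mpr h))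
    rw [pvOrdered, pv_sort2_decomp (fun s => (pvRank xs).getD (pvSget s "pursuit_id" "") 0)
        (fun s => pvSget s "recorded_at" "") xs ((List.range (pvKeys xs).length).map Int.ofNat) hpw hcov]
    rw [List.flatMap_map]
    rw [← pv_range_getD_flatMap (pvKeys xs) (fun p => PySem.List.sorted (pvGroup xs p) pvRec)]
    apply List.flatMap_congr
    intro j hj
    have hjl : j < (pvKeys xs).length := List.mem_range.mp hj
    congr 1
    apply List.filter_congr
    intro s hs
    have hkb : (pvRank xs).getD (pvPid s) 0 = ((pvKeys xs).idxOf (pvPid s) : Int) := pv_kb_eq xs s hs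
    apply Bool.coe_iff_coe.mp
    simp only [beq_iff_eq]
    rw [show (pvSget s "pursuit_id" "") = pvPid s from rfl, hkb]
    rw [List.getD_eq_getElem (pvKeys xs) "" hjl]
    constructor
    · intro h
      have h' : ((pvKeys xs).idxOf (pvPid s) : Int) = (j : Int) := h
      have hidx : (pvKeys xs).idxOf (pvPid s) = j := by exact_mod_cast h'
      subst hidx
      exact (List.getElem_idxOf hjl).symm
    · intro h
      have := List.Nodup.idxOf_getElem (pv_nodup_keys xs) j hjl
      rw [← h] at this
      rw [this]
      rfl
  rw [hord]
  rw [PySem.List.slice_from _ (by omega : (0:Int) ≤ 1)]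
  rw [show ((1:Int).toNat) = 1 from rfl, List.drop_one]
  rw [PySem.List.foldl_append_if]
  simp only [pvPid_def]
  rw [pv_scan_concat (fun p => PySem.List.sorted (pvGroup xs p) pvRec) (pvKeys xs)
        (pv_nodup_keys xs) ?hne ?hpid]
  case hne =>
    intro p hp
    rw [ne_eq, PySem.List.sorted_eq_nil_iff]
    rw [pvKeys, PySem.Set.mem_ofList] at hp
    obtain ⟨s, hs, hsp⟩ := List.mem_map.mp hp
    intro hnil
    have : s ∈ pvGroup xs p := by
      rw [pvGroup, List.mem_filter]
      exact ⟨hs, by simp [hsp]⟩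
    simp [hnil] at this
  case hpid =>
    intro p _ y hy
    rw [PySem.List.mem_sorted] at hy
    simpa using (List.mem_filter.mp hy).2
  rw [List.map_flatMap]
  rfl

-- ===== VERDICT (by name: the statement is the Claim_ definition above) =====
theorem pair_snapshots_by_pursuit_py_spec : Claim_equal_pair_snapshots_by_pursuit_py := by
  intro snapshots _
  unfold Spec_pair_snapshots_by_pursuit_py
  rw [A_eq_canon, B_eq_canon]
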